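-- pv_equiv track=rewrite | github.com/Unidata/MetPy | metpy/io/_nexrad_msgs/parse_spec.py | fix_var_name
-- ===== SOURCE A (Python) =====
-- def fix_var_name(var_name):
--     """Clean up and apply standard formatting to variable names."""
--     name = var_name.strip()
--     for char in '(). /#,':
--         name = name.replace(char, '_')
--     name = name.replace('+', 'pos_')
--     name = name.replace('-', 'neg_')
--     if name.endswith('_'):
--         name = name[:-1]
--     return name
-- ===== SOURCE B (Python) =====
-- def fix_var_name(var_name):
--     """Clean up and apply standard formatting to variable names."""
--     table = {}
--     for ch in '(). /#,':
--         table[ch] = '_'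
--     table['+'] = 'pos_'
--     table['-'] = 'neg_'
--     out = []
--     for ch in var_name.strip():
--         out.append(table.get(ch, ch))
--     result = ''.join(out)
--     if result.endswith('_'):
--         result = result[:-1]
--     return result
-- ===== Notes on version B (the rewrite author's own statement) =====
-- stated objective: alternative
-- what changed: Replaced nine sequential full-string str.replace scans with one dict translation table consulted in a single pass over the stripped string, joined at the end with the same trailing-underscore trim.
import Mathlib
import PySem

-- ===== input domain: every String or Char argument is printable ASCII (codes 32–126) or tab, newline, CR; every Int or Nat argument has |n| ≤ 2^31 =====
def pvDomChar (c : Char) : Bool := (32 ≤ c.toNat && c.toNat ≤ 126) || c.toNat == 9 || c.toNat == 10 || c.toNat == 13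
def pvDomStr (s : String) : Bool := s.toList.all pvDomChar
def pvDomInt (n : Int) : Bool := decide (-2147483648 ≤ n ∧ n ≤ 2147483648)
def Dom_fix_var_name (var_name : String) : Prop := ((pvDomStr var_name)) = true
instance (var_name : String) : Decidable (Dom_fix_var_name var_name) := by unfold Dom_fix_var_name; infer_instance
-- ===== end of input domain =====

-- B replaces A's nine sequential full-string str.replace passes by a single table-driven pass
-- over the stripped string (objective: alternative decomposition, same observable behaviour).

-- ===== PORT A =====
def fix_var_name (var_name : String) : String :=
  let name := PySem.Str.strip var_name
  let name := ("(). /#,".toList).foldl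
    (fun n ch => PySem.Str.replace n (String.singleton ch) "_") name
  let name := PySem.Str.replace name "+" "pos_"
  let name := PySem.Str.replace name "-" "neg_"
  if PySem.Str.endswith name "_" then PySem.Str.slice name none (some (-1)) else name

-- ===== PORT B =====
def fix_var_name_alt (var_name : String) : String :=
  let table : PySem.Dict Char String :=
    ((("(). /#,".toList).foldl
        (fun d ch => PySem.Dict.insert d ch "_") PySem.Dict.empty).insert '+' "pos_").insert '-' "neg_"
  let out : List String := ((PySem.Str.strip var_name).toList).foldl
    (fun acc ch => acc ++ [PySem.Dict.getD table ch (String.singleton ch)]) []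
  let result := PySem.Str.join "" out
  if PySem.Str.endswith result "_" then PySem.Str.slice result none (some (-1)) else result

-- ===== PRECONDITION & SPEC =====
def Spec_fix_var_name (var_name : String) (out : String) : Prop := out = fix_var_name_alt var_name
instance (var_name : String) (out : String) : Decidable (Spec_fix_var_name var_name out) := by unfold Spec_fix_var_name; infer_instance

-- ===== CLAIM (what is proved, stated in full; the proofs are below) =====
def Claim_equal_fix_var_name : Prop := ∀ (var_name : String), Dom_fix_var_name var_name → Spec_fix_var_name var_name (fix_var_name var_name)

-- ===== LEMMAS AND PROOFS =====

-- the common per-character translation both programs implement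
def pvMap (x : Char) : List Char :=
  if x = '(' ∨ x = ')' ∨ x = '.' ∨ x = ' ' ∨ x = '/' ∨ x = '#' ∨ x = ',' then ['_']
  else if x = '+' then ['p', 'o', 's', '_']
  else if x = '-' then ['n', 'e', 'g', '_']
  else [x]

theorem join_nil_flatten (l : List (List Char)) : PySem.Chars.join [] l = l.flatten := by
  simp [PySem.Chars.join]
  induction l with
  | nil => simp [List.intercalate]
  | cons x xs ih => cases xs <;> simp_all [List.intercalate, List.intersperse]

theorem go_single (c : Char) (new : List Char) :
    ∀ (l : List Char) (fuel : Nat) (acc : List Char), l.length ≤ fuel →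
      PySem.Chars.replace.go [c] new fuel l acc
        = acc.reverse ++ l.flatMap (fun x => if x = c then new else [x]) := by
  intro l
  induction l with
  | nil => intro fuel acc h; cases fuel <;> simp [PySem.Chars.replace.go]
  | cons x t ih =>
    intro fuel acc h
    cases fuel with
    | zero => simp at h
    | succ fuel =>
      simp only [PySem.Chars.replace.go]
      by_cases hx : x = c
      · subst hx
        have hp : [x].isPrefixOf (x :: t) = true := by simp [List.isPrefixOf]
        rw [hp]
        simp only [List.length_cons, List.length_nil, List.drop_succ_cons, List.drop_zero, if_true]
        rw [ih fuel _ (by simp at h; omega)]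
        simp
      · have hp : [c].isPrefixOf (x :: t) = false := by
          simp [List.isPrefixOf]; exact fun hc => (hx hc.symm).elim
        rw [hp]
        simp only [Bool.false_eq_true, if_false]
        rw [ih fuel _ (by simp at h; omega)]
        simp [hx]

theorem replace_single (l : List Char) (c : Char) (new : List Char) :
    PySem.Chars.replace l [c] new = l.flatMap (fun x => if x = c then new else [x]) := by
  rw [PySem.Chars.replace]
  simp only [List.isEmpty_cons, Bool.false_eq_true, if_false]
  simpa using go_single c new l l.length [] (le_refl _)

-- A's nine replace passes collapse to one flatMap of pvMap
theorem chainA (s : String) :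
    (PySem.Str.replace (PySem.Str.replace
        (("(). /#,".toList).foldl
          (fun n ch => PySem.Str.replace n (String.singleton ch) "_") s)
        "+" "pos_") "-" "neg_").toList
      = s.toList.flatMap pvMap := by
  have htl : "(). /#,".toList = ['(', ')', '.', ' ', '/', '#', ','] := rfl
  rw [htl]
  simp only [List.foldl_cons, List.foldl_nil]
  simp only [PySem.Str.toList_replace]
  have h1 : ("_" : String).toList = ['_'] := rfl
  have hp : ("pos_" : String).toList = ['p', 'o', 's', '_'] := rfl
  have hn : ("neg_" : String).toList = ['n', 'e', 'g', '_'] := rfl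
  have hplus : ("+" : String).toList = ['+'] := rfl
  have hminus : ("-" : String).toList = ['-'] := rfl
  simp only [String.toList_singleton, h1, hp, hn, hplus, hminus, replace_single]
  simp only [List.flatMap_assoc]
  congr 1
  funext x
  by_cases h₁ : x = '(' <;> by_cases h₂ : x = ')' <;> by_cases h₃ : x = '.' <;>
    by_cases h₄ : x = ' ' <;> by_cases h₅ : x = '/' <;> by_cases h₆ : x = '#' <;>
    by_cases h₇ : x = ',' <;> by_cases h₈ : x = '+' <;> by_cases h₉ : x = '-' <;>
    simp_all [pvMap]

-- B's table lookup agrees with pvMap characterwise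
theorem tableB (x : Char) :
    (PySem.Dict.getD
        ((((("(). /#,".toList).foldl
            (fun d ch => PySem.Dict.insert d ch ("_" : String)) PySem.Dict.empty).insert
              '+' "pos_").insert '-' "neg_"))
        x (String.singleton x)).toList = pvMap x := by
  have htl : "(). /#,".toList = ['(', ')', '.', ' ', '/', '#', ','] := rfl
  rw [htl]
  simp only [List.foldl_cons, List.foldl_nil]
  simp only [PySem.Dict.getD_insert]
  simp only [PySem.Dict.getD, PySem.Dict.get?, PySem.Dict.empty, List.find?_nil,
    Option.map_none, Option.getD_none]
  unfold pvMap
  split_ifs <;> simp_all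

theorem body_eq (s : String) :
    (PySem.Str.replace (PySem.Str.replace
        (("(). /#,".toList).foldl
          (fun n ch => PySem.Str.replace n (String.singleton ch) "_") (PySem.Str.strip s))
        "+" "pos_") "-" "neg_")
      = PySem.Str.join ""
          (((PySem.Str.strip s).toList).foldl
            (fun acc ch => acc ++ [PySem.Dict.getD
              ((((("(). /#,".toList).foldl
                  (fun d ch => PySem.Dict.insert d ch ("_" : String)) PySem.Dict.empty).insert
                    '+' "pos_").insert '-' "neg_")) ch (String.singleton ch)]) []) := by
  rw [← String.toList_inj]
  rw [chainA]
  rw [PySem.Str.toList_join]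
  rw [PySem.List.foldl_append_singleton_eq_map]
  have hsep : ("" : String).toList = [] := rfl
  rw [hsep, List.nil_append, List.map_map, join_nil_flatten]
  rw [List.flatMap_def]
  congr 1
  exact List.map_congr_left fun x _ => by simpa using (tableB x).symm

-- ===== VERDICT (by name: the statement is the Claim_ definition above) =====
theorem fix_var_name_spec : Claim_equal_fix_var_name := by
  intro v _
  unfold Spec_fix_var_name fix_var_name fix_var_name_alt
  dsimp only
  rw [body_eq v]
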